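-- pv_equiv track=rewrite | github.com/Hetal2108/LocalRepo | Practical1.py | mfbc
-- ===== SOURCE A (Python) =====
-- def mfbc(lib_data):
--     freq_map = {}
--
--     for book in lib_data:
--         for count in lib_data[book]:
--             if count in freq_map:
--                 freq_map[count] += 1
--             else:
--                 freq_map[count] = 1
--
--     max_freq = 0
--     max_count = None
--
--     for count in freq_map:
--         if freq_map[count] > max_freq:
--             max_freq = freq_map[count]
--             max_count = count
--
--     return max_count
-- ===== SOURCE B (Python) =====
-- def mfbc(lib_data):
--     flat = [c for counts in lib_data.values() for c in counts]
--     best_count, best_val = 0, None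
--     rest = flat
--     while rest:
--         v = rest[0]
--         c = rest.count(v)
--         if c > best_count:
--             best_count, best_val = c, v
--         rest = [x for x in rest if x != v]
--     return best_val
-- ===== Notes on version B (the rewrite author's own statement) =====
-- stated objective: alternative
-- what changed: Drops the frequency dict entirely: B repeatedly takes the first remaining value, counts its occurrences with list.count, and filters all of them out of the working list, keeping a running best (strict-greater, so first occurrence wins ties) -- count-and-filter selection instead of build-a-map-then-argmax.
-- outside the precondition, e.g. on mfbc({'math': []}): A returns None, B returns None
import Mathlib
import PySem

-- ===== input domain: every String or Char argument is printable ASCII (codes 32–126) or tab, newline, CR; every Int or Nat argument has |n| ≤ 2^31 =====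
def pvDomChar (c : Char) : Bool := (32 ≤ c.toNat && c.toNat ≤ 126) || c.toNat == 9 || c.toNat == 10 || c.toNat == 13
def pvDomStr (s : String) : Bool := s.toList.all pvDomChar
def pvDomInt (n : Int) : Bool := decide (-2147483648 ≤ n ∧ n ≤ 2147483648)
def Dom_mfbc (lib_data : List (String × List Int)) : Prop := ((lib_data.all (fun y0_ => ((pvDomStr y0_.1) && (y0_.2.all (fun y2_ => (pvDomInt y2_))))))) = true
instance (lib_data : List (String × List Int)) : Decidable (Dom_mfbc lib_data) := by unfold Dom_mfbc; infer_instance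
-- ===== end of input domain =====

-- B replaces A's hand-built frequency dict and argmax scan over it by a dict-free
-- count-and-filter recursion over the flattened values (objective: alternative; not faster).


-- ===== PORT A =====
-- `for book in lib_data: for count in lib_data[book]:` iterates the dict's keys and looks each
-- one up; on a Python dict that is exactly iteration over its (key, value) items, ported as a
-- fold over the association-list pairs.
def mfbcFreq (lib_data : List (String × List Int)) : PySem.Dict Int Int :=
  lib_data.foldl (fun d p =>
    p.2.foldl (fun d c =>
      if d.contains c then d.insert c (d.getD c 0 + 1) else d.insert c 1) d)
    PySem.Dict.empty

def mfbc (lib_data : List (String × List Int)) : Int :=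
  let freq := mfbcFreq lib_data
  let r := freq.keys.foldl (fun (s : Int × Option Int) c =>
      if freq.getD c 0 > s.1 then (freq.getD c 0, some c) else s) (0, none)
  -- Python returns None when no key beat max_freq = 0 (empty dict); 0 stands in for None,
  -- which Pre_mfbc excludes.
  match r.2 with
  | some v => v
  | none => 0

-- ===== PORT B =====
-- the `while rest:` loop: v = rest[0]; c = rest.count(v); update best; rest = [x for x in rest if x != v]
def mfbcAltLoop (rest : List Int) (best : Int × Option Int) : Option Int :=
  match rest with
  | [] => best.2
  | v :: t =>
    let c : Int := (PySem.List.count (v :: t) v : Int)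
    mfbcAltLoop ((v :: t).filter (fun x => x != v))
      (if c > best.1 then (c, some v) else best)
termination_by rest.length
decreasing_by
  simp only [List.filter_cons, bne_self_eq_false, Bool.false_eq_true, if_false, List.length_cons]
  exact Nat.lt_succ_of_le (List.length_filter_le _ t)

def mfbc_alt (lib_data : List (String × List Int)) : Int :=
  let flat := (lib_data.map Prod.snd).flatten
  match mfbcAltLoop flat (0, none) with
  | some v => v
  | none => 0   -- Python B returns None here; Pre_mfbc excludes it

-- ===== PRECONDITION & SPEC =====
-- Pre_ excludes inputs whose value lists are all empty: there A returns None, which is not a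
-- value of the declared Int return type (B also returns None there).
def Pre_mfbc (lib_data : List (String × List Int)) : Prop :=
  (lib_data.any (fun p => !p.2.isEmpty)) = true
instance (lib_data : List (String × List Int)) : Decidable (Pre_mfbc lib_data) := by
  unfold Pre_mfbc; infer_instance

def pvWitness_mfbc : (List (String × List Int)) := [("math", [3, 1, 3])]

def Spec_mfbc (lib_data : List (String × List Int)) (out : Int) : Prop := out = mfbc_alt lib_data
instance (lib_data : List (String × List Int)) (out : Int) : Decidable (Spec_mfbc lib_data out) := by unfold Spec_mfbc; infer_instance

-- ===== CLAIM (what is proved, stated in full; the proofs are below) =====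
def Claim_equal_mfbc : Prop := ∀ (lib_data : List (String × List Int)), Dom_mfbc lib_data → Pre_mfbc lib_data → Spec_mfbc lib_data (mfbc lib_data)

-- ===== LEMMAS AND PROOFS =====

-- A's conditional update is the Counter update.
theorem mfbcFreq_step (d : PySem.Dict Int Int) (c : Int) :
    (if d.contains c then d.insert c (d.getD c 0 + 1) else d.insert c 1)
      = d.insert c (d.getD c 0 + 1) := by
  by_cases h : d.contains c = true
  · simp [h]
  · simp only [Bool.not_eq_true] at h
    simp [h, PySem.Dict.getD_of_not_contains d 0 h]

-- A's nested dict-building loops build Counter of the flattened value lists.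
theorem mfbcFreq_eq_counter (lib_data : List (String × List Int)) :
    mfbcFreq lib_data = PySem.Dict.counter ((lib_data.map Prod.snd).flatten) := by
  unfold mfbcFreq
  simp only [mfbcFreq_step]
  rw [← PySem.Dict.foldl_insert_getD_add_one_eq_counter, List.foldl_flatten, List.foldl_map]

-- folding Set.add over elements all ≠ v skips past a leading v in the accumulator
theorem foldl_add_cons (v : Int) (l : List Int) (h : ∀ x ∈ l, x ≠ v) :
    ∀ s : List Int, l.foldl PySem.Set.add (v :: s) = v :: l.foldl PySem.Set.add s := by
  induction l with
  | nil => intro s; rfl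
  | cons x t ih =>
    intro s
    have hx : x ≠ v := h x List.mem_cons_self
    have ht : ∀ y ∈ t, y ≠ v := fun y hy => h y (List.mem_cons_of_mem _ hy)
    have hstep : PySem.Set.add (v :: s) x = v :: PySem.Set.add s x := by
      by_cases hm : x ∈ s
      · simp [PySem.Set.add, PySem.Set.contains, hm, hx]
      · simp [PySem.Set.add, PySem.Set.contains, hm, hx]
    rw [List.foldl_cons, hstep, List.foldl_cons, ih ht]

-- once v is in the accumulating set, elements equal to v are skipped by the Set.add fold
theorem foldl_add_filter (v : Int) (l : List Int) :
    ∀ s : List Int, v ∈ s →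
      l.foldl PySem.Set.add s = (l.filter (fun x => x != v)).foldl PySem.Set.add s := by
  induction l with
  | nil => intro s _; rfl
  | cons x t ih =>
    intro s hv
    by_cases hx : x = v
    · subst hx
      have : PySem.Set.add s x = s := by
        simp [PySem.Set.add, PySem.Set.contains, hv]
      simp only [List.filter_cons, bne_self_eq_false, Bool.false_eq_true, if_false,
        List.foldl_cons, this]
      exact ih s hv
    · have hb : (x != v) = true := by simpa using hx
      simp only [List.filter_cons, hb, if_true, List.foldl_cons]
      exact ih (PySem.Set.add s x) (by
        simp only [PySem.Set.add]
        split_ifs <;> simp [hv])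

-- first-occurrence dedup peels its head and drops later copies of it
theorem ofList_cons_filter (v : Int) (t : List Int) :
    PySem.Set.ofList (v :: t) = v :: PySem.Set.ofList (t.filter (fun x => x != v)) := by
  have h1 : PySem.Set.ofList (v :: t) = t.foldl PySem.Set.add [v] := by
    rw [PySem.Set.ofList_eq_foldl]; rfl
  have h2 := foldl_add_filter v t [v] (List.mem_singleton.mpr rfl)
  have h3 : ∀ x ∈ t.filter (fun x => x != v), x ≠ v := by
    intro x hx
    have := List.of_mem_filter hx
    simpa using this
  rw [h1, h2, foldl_add_cons v _ h3 [], PySem.Set.ofList_eq_foldl]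

-- B's count-and-filter loop computes A's argmax fold over the distinct values with their counts
theorem altLoop_aux : ∀ (n : Nat) (xs : List Int), xs.length ≤ n → ∀ acc : Int × Option Int,
    mfbcAltLoop xs acc
      = ((PySem.Set.ofList xs).foldl (fun (s : Int × Option Int) k =>
          if ((List.count k xs : Int)) > s.1 then ((List.count k xs : Int), some k) else s)
          acc).2 := by
  intro n
  induction n with
  | zero =>
    intro xs h acc
    have : xs = [] := List.eq_nil_of_length_eq_zero (Nat.le_zero.mp h)
    subst this
    rw [mfbcAltLoop]
    rw [PySem.Set.ofList_eq_foldl]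
    rfl
  | succ n ih =>
    intro xs h acc
    match xs with
    | [] =>
      rw [mfbcAltLoop]
      rw [PySem.Set.ofList_eq_foldl]
      rfl
    | v :: t =>
      have hfilter : (v :: t).filter (fun x => x != v) = t.filter (fun x => x != v) := by
        simp
      have hlen : (t.filter (fun x => x != v)).length ≤ n := by
        have := List.length_filter_le (fun x => x != v) t
        simp only [List.length_cons, Nat.succ_le_succ_iff] at h
        omega
      rw [mfbcAltLoop, hfilter,
        ih (t.filter (fun x => x != v)) hlen, ofList_cons_filter]
      rw [List.foldl_cons]
      have hcv : (PySem.List.count (v :: t) v : Int) = (List.count v (v :: t) : Int) := by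
        rw [PySem.List.count_eq]
      have hcount : ∀ k ∈ PySem.Set.ofList (t.filter (fun x => x != v)),
          List.count k (t.filter (fun x => x != v)) = List.count k (v :: t) := by
        intro k hk
        have hkmem : k ∈ t.filter (fun x => x != v) := (PySem.Set.mem_ofList _ _).mp hk
        have hkv : k ≠ v := by simpa using List.of_mem_filter hkmem
        rw [List.count_filter (by simpa using hkv)]
        have hvk : ¬ v = k := fun hh => hkv hh.symm
        simp [hvk]
      have hcongr : ∀ (s₀ : Int × Option Int),
          (PySem.Set.ofList (t.filter (fun x => x != v))).foldl
            (fun (s : Int × Option Int) k =>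
              if ((List.count k (t.filter (fun x => x != v)) : Int)) > s.1
              then ((List.count k (t.filter (fun x => x != v)) : Int), some k) else s) s₀
          = (PySem.Set.ofList (t.filter (fun x => x != v))).foldl
            (fun (s : Int × Option Int) k =>
              if ((List.count k (v :: t) : Int)) > s.1
              then ((List.count k (v :: t) : Int), some k) else s) s₀ := by
        intro s₀
        apply PySem.List.foldl_congr_mem
        intro s k hk
        rw [hcount k hk]
      rw [hcongr, hcv]

theorem altLoop_eq_fold (xs : List Int) (acc : Int × Option Int) :
    mfbcAltLoop xs acc
      = ((PySem.Set.ofList xs).foldl (fun (s : Int × Option Int) k =>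
          if ((List.count k xs : Int)) > s.1 then ((List.count k xs : Int), some k) else s)
          acc).2 := altLoop_aux xs.length xs le_rfl acc

-- ===== VERDICT (by name: the statement is the Claim_ definition above) =====
theorem mfbc_spec : Claim_equal_mfbc := by
  intro lib_data _ _
  unfold Spec_mfbc
  simp only [mfbc, mfbc_alt]
  rw [mfbcFreq_eq_counter]
  set flat := (lib_data.map Prod.snd).flatten with hflat
  rw [altLoop_eq_fold flat (0, none), PySem.Dict.keys_counter]
  have : ∀ s₀ : Int × Option Int,
      (PySem.Set.ofList flat).foldl (fun (s : Int × Option Int) c =>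
        if (PySem.Dict.counter flat).getD c 0 > s.1
        then ((PySem.Dict.counter flat).getD c 0, some c) else s) s₀
      = (PySem.Set.ofList flat).foldl (fun (s : Int × Option Int) k =>
        if ((List.count k flat : Int)) > s.1 then ((List.count k flat : Int), some k) else s) s₀ := by
    intro s₀
    apply PySem.List.foldl_congr_mem
    intro s k _
    rw [PySem.Dict.getD_counter]
  rw [this]
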